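-- pv_equiv track=rewrite | github.com/spiritusnick/2026seallabelmaker | src/pdf_generator.py | extract_grind_type
-- ===== SOURCE A (Python) =====
-- from typing import List, Optional
--
-- GRIND_TYPES = [
--     "Whole Bean",
--     "Ground for Auto Drip",
--     "Ground Auto Drip",
--     "Auto Drip",
--     "Ground for Drip",
--     "French Press",
--     "Ground for French Press",
--     "Ground for Espresso",
--     "Espresso",
-- ]
--
-- def extract_grind_type(variant_info: str, product_name: str) -> Optional[str]:
--     """
--     Extract grind type from variant info or product name.
--
--     Args:
--         variant_info: The variant info string (e.g., "Rotating All Coffees / Whole Bean")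
--         product_name: The product name (may contain grind type)
--
--     Returns:
--         The grind type if found, None otherwise
--     """
--     # Check variant_info first (case-insensitive)
--     text_to_check = f"{variant_info} {product_name}".lower()
--
--     for grind in GRIND_TYPES:
--         if grind.lower() in text_to_check:
--             # Return normalized grind type
--             if "whole bean" in grind.lower():
--                 return "Whole Bean"
--             elif "french press" in grind.lower():
--                 return "French Press"
--             elif "auto drip" in grind.lower() or "for drip" in grind.lower():
--                 return "Ground Auto Drip"
--             elif "espresso" in grind.lower():
--                 return "Ground Espresso"
--             return grind
--
--     return None
-- ===== SOURCE B (Python) =====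
-- from typing import Optional
--
-- def extract_grind_type(variant_info: str, product_name: str) -> Optional[str]:
--     text = f"{variant_info} {product_name}".lower()
--     if "whole bean" in text:
--         return "Whole Bean"
--     if "auto drip" in text or "ground for drip" in text:
--         return "Ground Auto Drip"
--     if "french press" in text:
--         return "French Press"
--     if "espresso" in text:
--         return "Ground Espresso"
--     return None
-- ===== Notes on version B (the rewrite author's own statement) =====
-- stated objective: simpler
-- what changed: Replaces the loop over the 9-entry GRIND_TYPES list plus a second per-grind normalization pass by four direct priority substring checks on the combined lowered text, returning the normalized value immediately.
import Mathlib
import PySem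

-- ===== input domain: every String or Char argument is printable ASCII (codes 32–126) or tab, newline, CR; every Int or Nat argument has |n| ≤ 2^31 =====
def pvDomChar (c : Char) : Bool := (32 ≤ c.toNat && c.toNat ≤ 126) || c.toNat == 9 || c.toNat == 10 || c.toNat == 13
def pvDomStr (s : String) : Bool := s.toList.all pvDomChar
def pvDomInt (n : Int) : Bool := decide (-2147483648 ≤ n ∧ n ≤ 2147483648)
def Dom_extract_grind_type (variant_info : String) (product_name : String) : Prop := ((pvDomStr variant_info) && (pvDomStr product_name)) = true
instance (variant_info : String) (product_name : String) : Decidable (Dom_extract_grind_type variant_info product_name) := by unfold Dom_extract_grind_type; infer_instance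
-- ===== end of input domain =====

-- B replaces A's loop over GRIND_TYPES + per-grind normalization by four direct
-- priority substring checks on the combined lowered text (simpler decomposition).

-- ===== PORT A =====
def pvGRIND_TYPES : List String :=
  ["Whole Bean", "Ground for Auto Drip", "Ground Auto Drip", "Auto Drip",
   "Ground for Drip", "French Press", "Ground for French Press",
   "Ground for Espresso", "Espresso"]

-- the body of A's for-loop, as structural recursion over the same list
def pvEgtLoop (text : String) : List String → Option String
  | [] => none
  | grind :: rest =>
    if PySem.Str.isIn (PySem.Str.lower grind) text then
      if PySem.Str.isIn "whole bean" (PySem.Str.lower grind) then some "Whole Bean"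
      else if PySem.Str.isIn "french press" (PySem.Str.lower grind) then some "French Press"
      else if (PySem.Str.isIn "auto drip" (PySem.Str.lower grind) || PySem.Str.isIn "for drip" (PySem.Str.lower grind)) then some "Ground Auto Drip"
      else if PySem.Str.isIn "espresso" (PySem.Str.lower grind) then some "Ground Espresso"
      else some grind
    else pvEgtLoop text rest

def extract_grind_type (variant_info : String) (product_name : String) : Option String :=
  pvEgtLoop (PySem.Str.lower (variant_info ++ " " ++ product_name)) pvGRIND_TYPES

-- ===== PORT B =====
def extract_grind_type_alt (variant_info : String) (product_name : String) : Option String :=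
  let text := PySem.Str.lower (variant_info ++ " " ++ product_name)
  if PySem.Str.isIn "whole bean" text then some "Whole Bean"
  else if (PySem.Str.isIn "auto drip" text || PySem.Str.isIn "ground for drip" text) then some "Ground Auto Drip"
  else if PySem.Str.isIn "french press" text then some "French Press"
  else if PySem.Str.isIn "espresso" text then some "Ground Espresso"
  else none

-- ===== PRECONDITION & SPEC =====
def Spec_extract_grind_type (variant_info : String) (product_name : String) (out : Option String) : Prop := out = extract_grind_type_alt variant_info product_name
instance (variant_info : String) (product_name : String) (out : Option String) : Decidable (Spec_extract_grind_type variant_info product_name out) := by unfold Spec_extract_grind_type; infer_instance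

-- ===== CLAIM (what is proved, stated in full; the proofs are below) =====
def Claim_equal_extract_grind_type : Prop := ∀ (variant_info : String) (product_name : String), Dom_extract_grind_type variant_info product_name → Spec_extract_grind_type variant_info product_name (extract_grind_type variant_info product_name)

-- ===== LEMMAS AND PROOFS =====

-- a substring of a substring of t is a substring of t
theorem pv_isIn_mono (sub mid t : String) (h : sub.toList <:+: mid.toList)
    (hm : PySem.Str.isIn mid t = true) : PySem.Str.isIn sub t = true := by
  rw [PySem.Str.isIn_iff_infix] at hm ⊢
  exact h.trans hm

-- evaluations of A's constant normalization block on each of the nine (lowered) grinds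
theorem pvL1 : PySem.Str.lower "Whole Bean" = "whole bean" := by decide

theorem pvN1 :
    (if PySem.Str.isIn "whole bean" "whole bean" then some "Whole Bean"
     else if PySem.Str.isIn "french press" "whole bean" then some "French Press"
     else if (PySem.Str.isIn "auto drip" "whole bean" || PySem.Str.isIn "for drip" "whole bean") then some "Ground Auto Drip"
     else if PySem.Str.isIn "espresso" "whole bean" then some "Ground Espresso"
     else some "Whole Bean") = some "Whole Bean" := by decide

theorem pvL2 : PySem.Str.lower "Ground for Auto Drip" = "ground for auto drip" := by decide

theorem pvN2 :
    (if PySem.Str.isIn "whole bean" "ground for auto drip" then some "Whole Bean"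
     else if PySem.Str.isIn "french press" "ground for auto drip" then some "French Press"
     else if (PySem.Str.isIn "auto drip" "ground for auto drip" || PySem.Str.isIn "for drip" "ground for auto drip") then some "Ground Auto Drip"
     else if PySem.Str.isIn "espresso" "ground for auto drip" then some "Ground Espresso"
     else some "Ground for Auto Drip") = some "Ground Auto Drip" := by decide

theorem pvL3 : PySem.Str.lower "Ground Auto Drip" = "ground auto drip" := by decide

theorem pvN3 :
    (if PySem.Str.isIn "whole bean" "ground auto drip" then some "Whole Bean"
     else if PySem.Str.isIn "french press" "ground auto drip" then some "French Press"
     else if (PySem.Str.isIn "auto drip" "ground auto drip" || PySem.Str.isIn "for drip" "ground auto drip") then some "Ground Auto Drip"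
     else if PySem.Str.isIn "espresso" "ground auto drip" then some "Ground Espresso"
     else some "Ground Auto Drip") = some "Ground Auto Drip" := by decide

theorem pvL4 : PySem.Str.lower "Auto Drip" = "auto drip" := by decide

theorem pvN4 :
    (if PySem.Str.isIn "whole bean" "auto drip" then some "Whole Bean"
     else if PySem.Str.isIn "french press" "auto drip" then some "French Press"
     else if (PySem.Str.isIn "auto drip" "auto drip" || PySem.Str.isIn "for drip" "auto drip") then some "Ground Auto Drip"
     else if PySem.Str.isIn "espresso" "auto drip" then some "Ground Espresso"
     else some "Auto Drip") = some "Ground Auto Drip" := by decide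

theorem pvL5 : PySem.Str.lower "Ground for Drip" = "ground for drip" := by decide

theorem pvN5 :
    (if PySem.Str.isIn "whole bean" "ground for drip" then some "Whole Bean"
     else if PySem.Str.isIn "french press" "ground for drip" then some "French Press"
     else if (PySem.Str.isIn "auto drip" "ground for drip" || PySem.Str.isIn "for drip" "ground for drip") then some "Ground Auto Drip"
     else if PySem.Str.isIn "espresso" "ground for drip" then some "Ground Espresso"
     else some "Ground for Drip") = some "Ground Auto Drip" := by decide

theorem pvL6 : PySem.Str.lower "French Press" = "french press" := by decide

theorem pvN6 :
    (if PySem.Str.isIn "whole bean" "french press" then some "Whole Bean"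
     else if PySem.Str.isIn "french press" "french press" then some "French Press"
     else if (PySem.Str.isIn "auto drip" "french press" || PySem.Str.isIn "for drip" "french press") then some "Ground Auto Drip"
     else if PySem.Str.isIn "espresso" "french press" then some "Ground Espresso"
     else some "French Press") = some "French Press" := by decide

theorem pvL7 : PySem.Str.lower "Ground for French Press" = "ground for french press" := by decide

theorem pvN7 :
    (if PySem.Str.isIn "whole bean" "ground for french press" then some "Whole Bean"
     else if PySem.Str.isIn "french press" "ground for french press" then some "French Press"
     else if (PySem.Str.isIn "auto drip" "ground for french press" || PySem.Str.isIn "for drip" "ground for french press") then some "Ground Auto Drip"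
     else if PySem.Str.isIn "espresso" "ground for french press" then some "Ground Espresso"
     else some "Ground for French Press") = some "French Press" := by decide

theorem pvL8 : PySem.Str.lower "Ground for Espresso" = "ground for espresso" := by decide

theorem pvN8 :
    (if PySem.Str.isIn "whole bean" "ground for espresso" then some "Whole Bean"
     else if PySem.Str.isIn "french press" "ground for espresso" then some "French Press"
     else if (PySem.Str.isIn "auto drip" "ground for espresso" || PySem.Str.isIn "for drip" "ground for espresso") then some "Ground Auto Drip"
     else if PySem.Str.isIn "espresso" "ground for espresso" then some "Ground Espresso"
     else some "Ground for Espresso") = some "Ground Espresso" := by decide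

theorem pvL9 : PySem.Str.lower "Espresso" = "espresso" := by decide

theorem pvN9 :
    (if PySem.Str.isIn "whole bean" "espresso" then some "Whole Bean"
     else if PySem.Str.isIn "french press" "espresso" then some "French Press"
     else if (PySem.Str.isIn "auto drip" "espresso" || PySem.Str.isIn "for drip" "espresso") then some "Ground Auto Drip"
     else if PySem.Str.isIn "espresso" "espresso" then some "Ground Espresso"
     else some "Espresso") = some "Ground Espresso" := by decide


-- if t has no "auto drip" / "french press" / "espresso", the longer grinds are absent too
theorem pv_no_gfad (t : String) (h : PySem.Str.isIn "auto drip" t = false) :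
    PySem.Str.isIn "ground for auto drip" t = false := by
  cases hx : PySem.Str.isIn "ground for auto drip" t with
  | false => rfl
  | true => rw [pv_isIn_mono "auto drip" "ground for auto drip" t (by decide) hx] at h; exact absurd h (by simp)

theorem pv_no_gad (t : String) (h : PySem.Str.isIn "auto drip" t = false) :
    PySem.Str.isIn "ground auto drip" t = false := by
  cases hx : PySem.Str.isIn "ground auto drip" t with
  | false => rfl
  | true => rw [pv_isIn_mono "auto drip" "ground auto drip" t (by decide) hx] at h; exact absurd h (by simp)

theorem pv_no_gffp (t : String) (h : PySem.Str.isIn "french press" t = false) :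
    PySem.Str.isIn "ground for french press" t = false := by
  cases hx : PySem.Str.isIn "ground for french press" t with
  | false => rfl
  | true => rw [pv_isIn_mono "french press" "ground for french press" t (by decide) hx] at h; exact absurd h (by simp)

theorem pv_no_gfe (t : String) (h : PySem.Str.isIn "espresso" t = false) :
    PySem.Str.isIn "ground for espresso" t = false := by
  cases hx : PySem.Str.isIn "ground for espresso" t with
  | false => rfl
  | true => rw [pv_isIn_mono "espresso" "ground for espresso" t (by decide) hx] at h; exact absurd h (by simp)

-- A's loop over the literal GRIND_TYPES list equals B's four-way priority chain
theorem pv_key (t : String) :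
    pvEgtLoop t pvGRIND_TYPES =
      (if PySem.Str.isIn "whole bean" t then some "Whole Bean"
       else if (PySem.Str.isIn "auto drip" t || PySem.Str.isIn "ground for drip" t) then some "Ground Auto Drip"
       else if PySem.Str.isIn "french press" t then some "French Press"
       else if PySem.Str.isIn "espresso" t then some "Ground Espresso"
       else none) := by
  simp only [pvGRIND_TYPES, pvEgtLoop, pvL1, pvL2, pvL3, pvL4, pvL5, pvL6, pvL7, pvL8, pvL9,
    pvN1, pvN2, pvN3, pvN4, pvN5, pvN6, pvN7, pvN8, pvN9, -reduceIte]
  by_cases hwb : PySem.Str.isIn "whole bean" t = true <;>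
  by_cases had : PySem.Str.isIn "auto drip" t = true <;>
  by_cases hgfd : PySem.Str.isIn "ground for drip" t = true <;>
  by_cases hfp : PySem.Str.isIn "french press" t = true <;>
  by_cases hesp : PySem.Str.isIn "espresso" t = true <;>
  simp_all [pv_no_gfad, pv_no_gad, pv_no_gffp, pv_no_gfe, -reduceIte, -PySem.Str.isIn_eq]

-- ===== VERDICT (by name: the statement is the Claim_ definition above) =====
theorem extract_grind_type_spec : Claim_equal_extract_grind_type := by
  intro vi pn _
  unfold Spec_extract_grind_type extract_grind_type extract_grind_type_alt
  exact pv_key _
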